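-- pv_equiv track=rewrite | github.com/richas26/AI-Based-Industry-Feedback-and-Auto-Response-System- | prompts.py | student_summary_prompt
-- ===== SOURCE A (Python) =====
-- def student_summary_prompt(data_dict, student_name):
--     """
--     Creates a student-wise summary prompt for the LLM.
--     """
--     student_column = data_dict['Name of The Student']
--
--     # Filter rows where the student name matches
--     student_feedback = {key: [] for key in data_dict.keys()}
--
--     for idx, student in enumerate(student_column):
--         if student == student_name:
--             for key in data_dict.keys():
--                 student_feedback[key].append(data_dict[key][idx])
--
--     prompt = f"""
--     Provide a summary for the student '{student_name}' based on the following internship feedback data: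
--     {student_feedback}
--     Summarize the student's performance, strengths, and areas for improvement.
--     """
--     return prompt
-- ===== SOURCE B (Python) =====
-- def student_summary_prompt(data_dict, student_name):
--     """
--     Creates a student-wise summary prompt for the LLM.
--     """
--     # Row-major strategy: turn the column dict into a stream of row tuples,
--     # keep the rows whose name field matches, then transpose back into columns.
--     keys = list(data_dict)
--     name_pos = keys.index('Name of The Student')
--     rows = zip(*(data_dict[k] for k in keys))
--     kept = [row for row in rows if row[name_pos] == student_name]
--     if kept:
--         student_feedback = dict(zip(keys, map(list, zip(*kept))))
--     else:
--         student_feedback = {k: [] for k in keys}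
--
--     prompt = f"""
--     Provide a summary for the student '{student_name}' based on the following internship feedback data:
--     {student_feedback}
--     Summarize the student's performance, strengths, and areas for improvement.
--     """
--     return prompt
-- ===== Notes on version B (the rewrite author's own statement) =====
-- stated objective: alternative
-- what changed: B is row-major where A is column-major: it transposes the column dict into a stream of row tuples with zip(*cols), filters whole rows by the name field's tuple position, and transposes the kept rows back into columns with zip(*kept), instead of A's per-row loop appending to every column's list.
import Mathlib
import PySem

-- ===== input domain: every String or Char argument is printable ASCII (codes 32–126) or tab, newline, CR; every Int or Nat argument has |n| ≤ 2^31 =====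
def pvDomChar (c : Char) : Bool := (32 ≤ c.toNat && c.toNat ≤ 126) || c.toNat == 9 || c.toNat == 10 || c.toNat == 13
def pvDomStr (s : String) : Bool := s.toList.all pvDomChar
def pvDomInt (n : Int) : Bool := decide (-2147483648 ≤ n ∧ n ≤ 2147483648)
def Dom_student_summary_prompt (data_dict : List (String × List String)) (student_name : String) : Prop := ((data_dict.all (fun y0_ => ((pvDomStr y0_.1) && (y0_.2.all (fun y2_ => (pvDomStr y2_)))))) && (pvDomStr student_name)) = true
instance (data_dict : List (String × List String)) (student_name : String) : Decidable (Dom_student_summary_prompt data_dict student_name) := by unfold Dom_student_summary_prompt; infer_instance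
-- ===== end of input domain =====

-- B is row-major where A is column-major: zip the columns into row tuples, filter whole rows,
-- transpose the kept rows back; objective: alternative (same cost, different data layout).

-- ===== PORT A =====
-- shared formatting helpers: hand port of Python's repr of a dict[str, list[str]] and of the
-- f-string; exact on the stated ASCII domain (printable + tab/newline/CR), where repr escapes
-- exactly '\\', '\n', '\r', '\t' and the chosen quote (double quote iff s has ' and no ").
def pyReprChar (q : Char) (c : Char) : List Char :=
  if c = '\\' then ['\\', '\\']
  else if c = '\n' then ['\\', 'n']
  else if c = '\r' then ['\\', 'r']
  else if c = '\t' then ['\\', 't']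
  else if c = q then ['\\', q]
  else [c]

def pyReprStr (s : String) : String :=
  let cs := s.toList
  let q : Char := if cs.contains '\'' && !(cs.contains '"') then '"' else '\''
  String.ofList ([q] ++ cs.flatMap (pyReprChar q) ++ [q])

def pyReprStrList (l : List String) : String :=
  "[" ++ String.intercalate ", " (l.map pyReprStr) ++ "]"

-- repr of the feedback dict, given its items in insertion order
def pyReprFeedback (items : List (String × List String)) : String :=
  "{" ++ String.intercalate ", " (items.map (fun p => pyReprStr p.1 ++ ": " ++ pyReprStrList p.2)) ++ "}"

-- the f-string of both Pythons
def promptOf (student_name : String) (items : List (String × List String)) : String :=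
  "\n    Provide a summary for the student '" ++ student_name ++
    "' based on the following internship feedback data:\n    " ++ pyReprFeedback items ++
    "\n    Summarize the student's performance, strengths, and areas for improvement.\n    "

-- literal port of A (data_dict viewed as the dict PySem.Dict.mk data_dict); Pre_ guarantees the
-- 'Name of The Student' lookup and every data_dict[key][idx] succeed, so .getD never fires inside Pre_.
def student_summary_prompt (data_dict : List (String × List String)) (student_name : String) : String :=
  let d : PySem.Dict String (List String) := PySem.Dict.mk data_dict
  let student_column : List String := (d.get? "Name of The Student").getD []
  let student_feedback : PySem.Dict String (List String) :=
    d.keys.foldl (fun fb key => fb.insert key []) PySem.Dict.empty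
  let student_feedback :=
    (PySem.List.enumerate student_column).foldl
      (fun fb p =>
        if p.2 == student_name then
          d.keys.foldl
            (fun fb key => fb.modify key [] (fun l => l ++ [((PySem.List.pyGet? ((d.get? key).getD []) p.1).getD "")]))
            fb
        else fb)
      student_feedback
  promptOf student_name student_feedback.items

-- ===== PORT B =====
-- port of Python's builtin zip(*cols) on a list of columns: rows until the shortest column ends
def pyZipCons (col : List String) (rest : List (List String)) : List (List String) :=
  match col with
  | [] => []
  | x :: xs =>
    if rest.all (fun l => !l.isEmpty) then
      (x :: rest.map (fun l => l.headI)) :: pyZipCons xs (rest.map (fun l => l.tail))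
    else []

def pyZipStar (cols : List (List String)) : List (List String) :=
  match cols with
  | [] => []
  | col :: rest => pyZipCons col rest

def student_summary_prompt_alt (data_dict : List (String × List String)) (student_name : String) : String :=
  let d : PySem.Dict String (List String) := PySem.Dict.mk data_dict
  let keys : List String := d.keys
  let name_pos : Int := ((PySem.List.index? keys "Name of The Student").getD 0 : Nat)
  let rows : List (List String) := pyZipStar (keys.map (fun k => (d.get? k).getD []))
  let kept : List (List String) :=
    rows.filter (fun row => (PySem.List.pyGet? row name_pos).getD "" == student_name)
  let student_feedback : List (String × List String) :=
    if kept.isEmpty then keys.map (fun k => (k, ([] : List String)))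
    else keys.zip (pyZipStar kept)
  promptOf student_name student_feedback

-- ===== PRECONDITION & SPEC =====
-- Pre_ excludes exactly the inputs where Python A raises: a missing 'Name of The Student' key
-- (KeyError) and a matching row index out of range of some column (IndexError); duplicate keys in
-- the association list are also excluded since they do not represent any Python dict.
def Pre_student_summary_prompt (data_dict : List (String × List String)) (student_name : String) : Prop :=
  (data_dict.map Prod.fst).Nodup ∧
  (PySem.Dict.mk data_dict).contains "Name of The Student" = true ∧
  (∀ i ∈ List.range ((PySem.Dict.mk data_dict).getD "Name of The Student" []).length,
     ((PySem.Dict.mk data_dict).getD "Name of The Student" [])[i]! = student_name →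
     ∀ kc ∈ data_dict, i < kc.2.length)

instance (data_dict : List (String × List String)) (student_name : String) : Decidable (Pre_student_summary_prompt data_dict student_name) := by
  unfold Pre_student_summary_prompt; infer_instance

def pvWitness_student_summary_prompt : (List (String × List String)) × String :=
  ([("Name of The Student", ["Alice", "Bob"]), ("Grade", ["A", "B"])], "Alice")

def Spec_student_summary_prompt (data_dict : List (String × List String)) (student_name : String) (out : String) : Prop := out = student_summary_prompt_alt data_dict student_name
instance (data_dict : List (String × List String)) (student_name : String) (out : String) : Decidable (Spec_student_summary_prompt data_dict student_name out) := by unfold Spec_student_summary_prompt; infer_instance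

-- ===== CLAIM (what is proved, stated in full; the proofs are below) =====
def Claim_equal_student_summary_prompt : Prop := ∀ (data_dict : List (String × List String)) (student_name : String), Dom_student_summary_prompt data_dict student_name → Pre_student_summary_prompt data_dict student_name → Spec_student_summary_prompt data_dict student_name (student_summary_prompt data_dict student_name)

-- ===== LEMMAS AND PROOFS =====

-- ---------- A-side: characterise A's feedback dict ----------

-- the inner for-key loop: each occurrence of j in ks appends x j to entry j
theorem pv_inner_getD (ks : List String) (x : String → String) (d : PySem.Dict String (List String)) (j : String) :
    (ks.foldl (fun fb key => fb.modify key [] (fun l => l ++ [x key])) d).getD j [] =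
      d.getD j [] ++ List.replicate (List.count j ks) (x j) := by
  induction ks generalizing d with
  | nil => simp
  | cons k ks ih =>
    simp only [List.foldl_cons, ih, List.count_cons]
    rw [PySem.Dict.getD_modify]
    by_cases h : j = k
    · subst h
      simp [List.replicate_succ, List.append_assoc]
    · simp [h, Ne.symm h]

-- the inner loop keeps the key list unchanged when every key is already present
theorem pv_inner_keys (ks : List String) (x : String → String) (d : PySem.Dict String (List String))
    (h : ∀ k ∈ ks, k ∈ d.keys) :
    (ks.foldl (fun fb key => fb.modify key [] (fun l => l ++ [x key])) d).keys = d.keys := by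
  induction ks generalizing d with
  | nil => rfl
  | cons k ks ih =>
    simp only [List.foldl_cons]
    have hc : d.contains k = true := (PySem.Dict.contains_iff_mem_keys d k).2 (h k (by simp))
    have hkeys : (d.modify k [] (fun l => l ++ [x k])).keys = d.keys := by
      rw [PySem.Dict.keys_modify, PySem.Dict.keys_insert_of_contains (h := hc)]
    rw [ih _ (by intro a ha; rw [hkeys]; exact h a (by simp [ha])), hkeys]

-- the outer for-row loop: keys stay fixed, and entry j collects x j i for every matching row i
theorem pv_outer (name : String) (kys : List String) (x : String → Int → String)
    (rows : List (Int × String)) (d : PySem.Dict String (List String))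
    (hnd : kys.Nodup) (hk : d.keys = kys) :
    (rows.foldl
        (fun fb p =>
          if p.2 == name then
            kys.foldl (fun fb key => fb.modify key [] (fun l => l ++ [x key p.1])) fb
          else fb) d).keys = kys ∧
    ∀ j ∈ kys,
      (rows.foldl
          (fun fb p =>
            if p.2 == name then
              kys.foldl (fun fb key => fb.modify key [] (fun l => l ++ [x key p.1])) fb
            else fb) d).getD j [] =
        d.getD j [] ++ (rows.filter (fun p => p.2 == name)).map (fun p => x j p.1) := by
  induction rows generalizing d with
  | nil => simpa using hk
  | cons r rows ih =>
    simp only [List.foldl_cons, List.filter_cons]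
    by_cases hr : r.2 == name
    · simp only [hr, if_true]
      have hkeys : (kys.foldl (fun fb key => fb.modify key [] (fun l => l ++ [x key r.1])) d).keys = kys := by
        rw [pv_inner_keys _ _ _ (by intro k hkk; rw [hk]; exact hkk), hk]
      obtain ⟨h1, h2⟩ := ih _ hkeys
      refine ⟨h1, fun j hj => ?_⟩
      rw [h2 j hj, pv_inner_getD]
      have hc : List.count j kys = 1 := List.count_eq_one_of_mem hnd hj
      simp [hc]
    · simp only [hr, if_false, Bool.false_eq_true]
      exact ih _ hk

-- the init loop {key: [] for key in keys}
theorem pv_init (kys : List String) (hnd : kys.Nodup) :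
    (kys.foldl (fun fb key => fb.insert key []) (PySem.Dict.empty : PySem.Dict String (List String))).items
      = kys.map (fun k => (k, ([] : List String))) := by
  have := PySem.Dict.items_foldl_insert_fresh (l := kys) (k := fun a => a)
    (v := fun _ => ([] : List String)) (d := (PySem.Dict.empty : PySem.Dict String (List String)))
    (by intro a _; simp) (by simpa using hnd)
  simpa using this

-- A's dict after the two loops, as an items list, equals the column-wise filtered list
theorem pv_items_eq (dd : List (String × List String)) (name : String)
    (hnd : (dd.map Prod.fst).Nodup) :
    ((PySem.List.enumerate (((PySem.Dict.mk dd).get? "Name of The Student").getD [])).foldl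
        (fun fb p =>
          if p.2 == name then
            (PySem.Dict.mk dd).keys.foldl
              (fun fb key => fb.modify key []
                (fun l => l ++ [((PySem.List.pyGet? (((PySem.Dict.mk dd).get? key).getD []) p.1).getD "")]))
              fb
          else fb)
        ((PySem.Dict.mk dd).keys.foldl (fun fb key => fb.insert key [])
          (PySem.Dict.empty : PySem.Dict String (List String)))).items
      = dd.map (fun kc => (kc.1,
          (((PySem.List.enumerate (((PySem.Dict.mk dd).get? "Name of The Student").getD [])).filter
              (fun p => p.2 == name)).map (·.1)).map
            (fun i => ((PySem.List.pyGet? kc.2 i).getD "")))) := by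
  have hk : (PySem.Dict.mk dd).keys = dd.map Prod.fst := by
    simp [PySem.Dict.keys]
  have hndk : (PySem.Dict.mk dd).keys.Nodup := by rw [hk]; exact hnd
  have hinit_items :
      ((PySem.Dict.mk dd).keys.foldl (fun fb key => fb.insert key [])
        (PySem.Dict.empty : PySem.Dict String (List String))).items
      = (PySem.Dict.mk dd).keys.map (fun k => (k, ([] : List String))) := pv_init _ hndk
  have hinit_keys :
      ((PySem.Dict.mk dd).keys.foldl (fun fb key => fb.insert key [])
        (PySem.Dict.empty : PySem.Dict String (List String))).keys = (PySem.Dict.mk dd).keys := by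
    have hrfl : ((PySem.Dict.mk dd).keys.foldl (fun fb key => fb.insert key [])
        (PySem.Dict.empty : PySem.Dict String (List String))).keys
        = ((PySem.Dict.mk dd).keys.foldl (fun fb key => fb.insert key [])
            (PySem.Dict.empty : PySem.Dict String (List String))).items.map (fun p => p.1) := rfl
    rw [hrfl, hinit_items, List.map_map]
    simp
  have hinit_getD : ∀ j ∈ (PySem.Dict.mk dd).keys,
      ((PySem.Dict.mk dd).keys.foldl (fun fb key => fb.insert key [])
        (PySem.Dict.empty : PySem.Dict String (List String))).getD j [] = [] := by
    intro j hj
    exact PySem.Dict.getD_of_mem_items _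
      (by rw [hinit_items]; exact List.mem_map.2 ⟨j, hj, rfl⟩)
      (by rw [hinit_keys]; exact hndk) []
  obtain ⟨hK, hG⟩ := pv_outer name ((PySem.Dict.mk dd).keys)
    (fun k i => ((PySem.List.pyGet? (((PySem.Dict.mk dd).get? k).getD []) i).getD ""))
    (PySem.List.enumerate (((PySem.Dict.mk dd).get? "Name of The Student").getD []))
    ((PySem.Dict.mk dd).keys.foldl (fun fb key => fb.insert key [])
      (PySem.Dict.empty : PySem.Dict String (List String)))
    hndk hinit_keys
  rw [PySem.Dict.items_eq_map_keys _ (by rw [hK]; exact hndk) ([] : List String), hK]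
  rw [hk] at hG hinit_getD ⊢
  rw [List.map_map]
  refine List.map_congr_left ?_
  intro kc hkc
  have hget : (PySem.Dict.mk dd).get? kc.1 = some kc.2 := by
    refine PySem.Dict.get?_of_mem_items _ ?_ hndk
    show (kc.1, kc.2) ∈ (PySem.Dict.mk dd).items
    simpa using hkc
  have hmem : kc.1 ∈ dd.map Prod.fst := List.mem_map.2 ⟨kc, hkc, rfl⟩
  have := hG kc.1 hmem
  simp only [Function.comp_apply]
  rw [this, hinit_getD kc.1 hmem, List.nil_append, List.map_map]
  refine congrArg _ (List.map_congr_left ?_)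
  intro p _
  simp [hget]

-- ---------- B-side: characterise the transposes ----------

-- the length of the shortest column, as the fold pyZipCons recurses on
def pvMin (col : List String) (rest : List (List String)) : Nat :=
  rest.foldl (fun m l => min m l.length) col.length

theorem pv_foldl_min_zero (rest : List (List String)) :
    rest.foldl (fun m l => min m l.length) 0 = 0 := by
  induction rest with
  | nil => rfl
  | cons l rest ih => simpa using ih

theorem pv_foldl_min_succ (rest : List (List String)) (k : Nat)
    (h : ∀ l ∈ rest, l ≠ []) :
    rest.foldl (fun m l => min m l.length) (k + 1)
      = (rest.map (fun l => l.tail)).foldl (fun m l => min m l.length) k + 1 := by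
  induction rest generalizing k with
  | nil => rfl
  | cons l rest ih =>
    have hl : l ≠ [] := h l (by simp)
    have hlen : 1 ≤ l.length := by
      cases l with
      | nil => exact absurd rfl hl
      | cons a t => simp
    have hmin : min (k + 1) l.length = min k (l.tail.length) + 1 := by
      have : l.tail.length = l.length - 1 := by simp
      omega
    simp only [List.foldl_cons, List.map_cons, hmin]
    exact ih _ (fun l' hl' => h l' (by simp [hl']))

theorem pv_foldl_min_of_mem_nil (rest : List (List String)) (init : Nat)
    (h : ∃ l ∈ rest, l = []) :
    rest.foldl (fun m l => min m l.length) init = 0 := by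
  induction rest generalizing init with
  | nil => simp at h
  | cons l rest ih =>
    obtain ⟨l', hl', hnil⟩ := h
    rcases List.mem_cons.1 hl' with h1 | h1
    · subst h1; subst hnil
      simp [pv_foldl_min_zero]
    · exact ih _ ⟨l', h1, hnil⟩

theorem pv_foldl_min_le_init (rest : List (List String)) (init : Nat) :
    rest.foldl (fun m l => min m l.length) init ≤ init := by
  induction rest generalizing init with
  | nil => simp
  | cons l rest ih =>
    exact le_trans (ih _) (by simp)

theorem pv_foldl_min_le_mem (rest : List (List String)) (init : Nat) (l : List String)
    (h : l ∈ rest) :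
    rest.foldl (fun m l => min m l.length) init ≤ l.length := by
  induction rest generalizing init with
  | nil => simp at h
  | cons l' rest ih =>
    simp only [List.foldl_cons]
    rcases List.mem_cons.1 h with h1 | h1
    · subst h1
      exact le_trans (pv_foldl_min_le_init _ _) (min_le_right _ _)
    · exact ih _ h1

theorem pv_lt_foldl_min (rest : List (List String)) (init : Nat) (i : Nat)
    (h0 : i < init) (h : ∀ l ∈ rest, i < l.length) :
    i < rest.foldl (fun m l => min m l.length) init := by
  induction rest generalizing init with
  | nil => simpa using h0
  | cons l rest ih =>
    refine ih _ (by simp [h0, h l (by simp)]) (fun l' hl' => h l' (by simp [hl']))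

-- zip(*·) of a nonempty list of columns = the row list indexed over the shortest length
theorem pv_zipCons_char (col : List String) (rest : List (List String)) :
    pyZipCons col rest
      = (List.range (pvMin col rest)).map (fun i => (col[i]!) :: rest.map (fun l => l[i]!)) := by
  induction col generalizing rest with
  | nil =>
    simp [pyZipCons, pvMin, pv_foldl_min_zero]
  | cons x xs ih =>
    by_cases h : rest.all (fun l => !l.isEmpty)
    · have hne : ∀ l ∈ rest, l ≠ [] := by
        intro l hl
        have := List.all_eq_true.1 h l hl
        simpa [List.isEmpty_iff] using this
      have hmin : pvMin (x :: xs) rest = pvMin xs (rest.map (fun l => l.tail)) + 1 := by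
        unfold pvMin
        simpa using pv_foldl_min_succ rest xs.length hne
      rw [pyZipCons, if_pos h, ih, hmin, List.range_succ_eq_map]
      simp only [List.map_cons, List.map_map]
      congr 1
      · congr 1
        refine List.map_congr_left ?_
        intro l hl
        cases l with
        | nil => exact absurd rfl (hne [] hl)
        | cons a t => simp
      · refine List.map_congr_left ?_
        intro i _
        simp only [Function.comp_apply]
        congr 1
        refine List.map_congr_left ?_
        intro l _
        cases l with
        | nil => simp
        | cons a t => simp
    · have hnil : ∃ l ∈ rest, l = [] := by
        simp only [List.all_eq_true, Bool.not_eq_eq_eq_not, Bool.not_true, not_forall] at h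
        obtain ⟨l, hl, hh⟩ := h
        exact ⟨l, hl, by simpa [List.isEmpty_iff] using hh⟩
      have hmin : pvMin (x :: xs) rest = 0 := pv_foldl_min_of_mem_nil _ _ hnil
      rw [pyZipCons, if_neg h, hmin]
      simp
    
theorem pv_zipStar_char (col : List String) (rest : List (List String)) :
    pyZipStar (col :: rest)
      = (List.range (pvMin col rest)).map (fun i => (col :: rest).map (fun l => l[i]!)) := by
  rw [pyZipStar, pv_zipCons_char]
  simp


-- the shortest length over rows of equal length m is m
theorem pv_foldl_min_const (m : Nat) (rest : List (List String)) (init : Nat)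
    (hinit : init = m) (h : ∀ l ∈ rest, l.length = m) :
    rest.foldl (fun a l => min a l.length) init = m := by
  induction rest generalizing init with
  | nil => simpa using hinit
  | cons l rest ih =>
    simp only [List.foldl_cons]
    exact ih _ (by rw [hinit, h l (by simp)]; simp) (fun l' h' => h l' (by simp [h']))

-- enumerate-then-filter-then-project = filter the index range directly
theorem pv_enum_filter (l : List String) (name : String) (s : Int) :
    ((PySem.List.enumerate l s).filter (fun p => p.2 == name)).map (·.1)
      = ((List.range l.length).filter (fun i => l[i]! == name)).map (fun i : Nat => s + (i : Int)) := by
  induction l generalizing s with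
  | nil => simp [PySem.List.enumerate_nil]
  | cons a l ih =>
    rw [PySem.List.enumerate_cons, List.length_cons, List.range_succ_eq_map]
    rw [List.filter_cons, List.filter_cons]
    have htail : (List.filter (fun i => (a :: l)[i]! == name) (List.map Nat.succ (List.range l.length)))
        = (List.filter (fun i => l[i]! == name) (List.range l.length)).map Nat.succ := by
      rw [List.filter_map]
      exact congrArg _ (List.filter_congr (fun i _ => by simp [Function.comp]))
    rw [htail]
    by_cases hcond : (a == name) = true
    · rw [if_pos hcond, if_pos (by simpa using hcond)]
      simp only [List.map_cons, List.map_map]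
      refine congrArg₂ List.cons (by simp) ?_
      rw [ih]
      refine List.map_congr_left fun i _ => ?_
      simp only [Function.comp_apply]
      push_cast
      ring
    · rw [if_neg hcond, if_neg (by simpa using hcond)]
      rw [List.map_map, ih]
      refine List.map_congr_left fun i _ => ?_
      simp only [Function.comp_apply]
      push_cast
      ring

-- reading a column list built as dd.map Prod.snd at an index
theorem pv_snd_at (dd : List (String × List String)) (cs : List (List String))
    (hc : dd.map Prod.snd = cs) (j : Nat) (hj : j < dd.length) (hjc : j < cs.length) :
    cs[j] = (dd[j]'hj).2 := by
  subst hc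
  simp

-- B's feedback association list equals the column-wise filtered list that A's dict flattens to
theorem pv_alt_items (dd : List (String × List String)) (name : String)
    (hnd : (dd.map Prod.fst).Nodup)
    (hcont : (PySem.Dict.mk dd).contains "Name of The Student" = true)
    (hidx : ∀ i ∈ List.range ((PySem.Dict.mk dd).getD "Name of The Student" []).length,
       ((PySem.Dict.mk dd).getD "Name of The Student" [])[i]! = name →
       ∀ kc ∈ dd, i < kc.2.length) :
    (if ((pyZipStar ((PySem.Dict.mk dd).keys.map (fun k => ((PySem.Dict.mk dd).get? k).getD []))).filter
          (fun row => (PySem.List.pyGet? row (((PySem.List.index? (PySem.Dict.mk dd).keys "Name of The Student").getD 0 : Nat) : Int)).getD "" == name)).isEmpty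
     then (PySem.Dict.mk dd).keys.map (fun k => (k, ([] : List String)))
     else (PySem.Dict.mk dd).keys.zip
            (pyZipStar ((pyZipStar ((PySem.Dict.mk dd).keys.map (fun k => ((PySem.Dict.mk dd).get? k).getD []))).filter
              (fun row => (PySem.List.pyGet? row (((PySem.List.index? (PySem.Dict.mk dd).keys "Name of The Student").getD 0 : Nat) : Int)).getD "" == name))))
    = dd.map (fun kc => (kc.1,
        (((PySem.List.enumerate (((PySem.Dict.mk dd).get? "Name of The Student").getD [])).filter
            (fun q => q.2 == name)).map (·.1)).map
          (fun i => ((PySem.List.pyGet? kc.2 i).getD "")))) := by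
  have hk : (PySem.Dict.mk dd).keys = dd.map Prod.fst := by simp [PySem.Dict.keys]
  have hndk : (PySem.Dict.mk dd).keys.Nodup := by rw [hk]; exact hnd
  have hmem : "Name of The Student" ∈ dd.map Prod.fst := by
    have := (PySem.Dict.contains_iff_mem_keys _ _).1 hcont
    rwa [hk] at this
  have hs : (PySem.List.index? (dd.map Prod.fst) "Name of The Student").isSome :=
    (PySem.List.index?_isSome_iff _ _).2 hmem
  obtain ⟨p, hp⟩ := Option.isSome_iff_exists.1 hs
  obtain ⟨hplt, hpeq, -⟩ := PySem.List.getElem_of_index?_eq_some hp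
  have hpdd : p < dd.length := by simpa using hplt
  have hdp1 : (dd[p]'hpdd).1 = "Name of The Student" := by simpa using hpeq
  have hgetN : (PySem.Dict.mk dd).get? "Name of The Student" = some (dd[p]'hpdd).2 := by
    have hmemitem : ((dd[p]'hpdd).1, (dd[p]'hpdd).2) ∈ (PySem.Dict.mk dd).items := by
      simp [List.getElem_mem hpdd]
    rw [← hdp1]
    exact PySem.Dict.get?_of_mem_items _ hmemitem hndk
  have hcols : (dd.map Prod.fst).map (fun k => ((PySem.Dict.mk dd).get? k).getD []) = dd.map Prod.snd := by
    rw [List.map_map]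
    refine List.map_congr_left fun kc hkc => ?_
    have hget : (PySem.Dict.mk dd).get? kc.1 = some kc.2 := by
      refine PySem.Dict.get?_of_mem_items _ ?_ hndk
      show (kc.1, kc.2) ∈ (PySem.Dict.mk dd).items
      simpa using hkc
    simp [hget]
  rw [hk, hp, hcols, hgetN]
  simp only [Option.getD_some]
  -- expose the head column
  obtain ⟨col0, restc, hc⟩ : ∃ col0 restc, dd.map Prod.snd = col0 :: restc := by
    cases h : dd.map Prod.snd with
    | nil =>
      exfalso
      have : dd.length = 0 := by simpa using congrArg List.length h
      omega
    | cons col0 restc => exact ⟨col0, restc, rfl⟩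
  rw [hc, pv_zipStar_char]
  -- bounds for the shortest length n
  have hnle : ∀ l ∈ col0 :: restc, pvMin col0 restc ≤ l.length := by
    intro l hl
    rcases List.mem_cons.1 hl with h1 | h1
    · subst h1; exact pv_foldl_min_le_init _ _
    · exact pv_foldl_min_le_mem _ _ _ h1
  have hnleD : ∀ kc ∈ dd, pvMin col0 restc ≤ kc.2.length := by
    intro kc hkc
    exact hnle kc.2 (by rw [← hc]; exact List.mem_map.2 ⟨kc, hkc, rfl⟩)
  have hcp : (col0 :: restc)[p]'(by rw [← hc]; simpa using hpdd) = (dd[p]'hpdd).2 :=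
    pv_snd_at dd _ hc p hpdd _
  -- the row filter is the index filter
  have hfc : ((List.range (pvMin col0 restc)).map
        (fun i => (col0 :: restc).map (fun l => l[i]!))).filter
        (fun row => (PySem.List.pyGet? row ((p : Nat) : Int)).getD "" == name)
      = ((List.range (pvMin col0 restc)).filter
          (fun i => (dd[p]'hpdd).2[i]! == name)).map
          (fun i => (col0 :: restc).map (fun l => l[i]!)) := by
    rw [List.filter_map]
    refine congrArg _ (List.filter_congr fun i _ => ?_)
    have hplen : p < (col0 :: restc).length := by rw [← hc]; simpa using hpdd
    simp only [Function.comp_apply, PySem.List.pyGet?_natCast, List.getElem?_map,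
      List.getElem?_eq_getElem hplen, Option.map_some, Option.getD_some, hcp]
  rw [hfc]
  -- the A-side index list is the same index filter
  have hidx' : ∀ i, i < (dd[p]'hpdd).2.length → (dd[p]'hpdd).2[i]! = name →
      ∀ kc ∈ dd, i < kc.2.length := by
    have hgg : (PySem.Dict.mk dd).getD "Name of The Student" [] = (dd[p]'hpdd).2 := by
      rw [PySem.Dict.getD_eq_get?_getD, hgetN]; rfl
    intro i h1 h2
    refine hidx i ?_ ?_
    · rw [hgg]; exact List.mem_range.2 h1
    · rw [hgg]; exact h2
  have hidxs : ((PySem.List.enumerate (dd[p]'hpdd).2).filter (fun q => q.2 == name)).map (·.1)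
      = ((List.range (pvMin col0 restc)).filter (fun i => (dd[p]'hpdd).2[i]! == name)).map
          (fun i : Nat => (i : Int)) := by
    rw [pv_enum_filter (dd[p]'hpdd).2 name 0]
    have hlen : (dd[p]'hpdd).2.length
        = pvMin col0 restc + ((dd[p]'hpdd).2.length - pvMin col0 restc) := by
      have := hnleD (dd[p]'hpdd) (List.getElem_mem hpdd)
      omega
    rw [hlen, List.range_add, List.filter_append]
    have h2 : ((List.range ((dd[p]'hpdd).2.length - pvMin col0 restc)).map
          (fun x => pvMin col0 restc + x)).filter (fun i => (dd[p]'hpdd).2[i]! == name) = [] := by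
      rw [List.filter_eq_nil_iff]
      intro i hi hpi
      obtain ⟨j, hj, rfl⟩ := List.mem_map.1 hi
      have hjlt : pvMin col0 restc + j < (dd[p]'hpdd).2.length := by
        have := List.mem_range.1 hj
        omega
      have : pvMin col0 restc + j < pvMin col0 restc := by
        refine pv_lt_foldl_min restc col0.length _ ?_ ?_
        · have hd0 : 0 < dd.length := by omega
          have hb := hidx' _ hjlt (by simpa using hpi) (dd[0]'hd0) (List.getElem_mem hd0)
          have hcol0 : col0 = (dd[0]'hd0).2 := by
            have h0 := pv_snd_at dd _ hc 0 hd0 (by simp)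
            simpa using h0
          have hlen0 : col0.length = (dd[0]'hd0).2.length := by rw [hcol0]
          omega
        · intro l hl
          obtain ⟨kc, hkc, rfl⟩ : ∃ kc ∈ dd, kc.2 = l := by
            have : l ∈ dd.map Prod.snd := by rw [hc]; exact List.mem_cons_of_mem _ hl
            obtain ⟨kc, hkc, h'⟩ := List.mem_map.1 this
            exact ⟨kc, hkc, h'⟩
          exact hidx' _ hjlt (by simpa using hpi) kc hkc
      omega
    rw [h2, List.append_nil]
    refine List.map_congr_left fun i _ => by simp
  have hA : dd.map (fun kc => (kc.1,
        (((PySem.List.enumerate (dd[p]'hpdd).2).filter (fun q => q.2 == name)).map (·.1)).map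
          (fun i => ((PySem.List.pyGet? kc.2 i).getD ""))))
      = dd.map (fun kc => (kc.1,
          ((List.range (pvMin col0 restc)).filter (fun i => (dd[p]'hpdd).2[i]! == name)).map
            (fun i => kc.2[i]!))) := by
    refine List.map_congr_left fun kc hkc => ?_
    refine congrArg (Prod.mk kc.1) ?_
    rw [hidxs, List.map_map]
    refine List.map_congr_left fun i hi => ?_
    have hin : i < pvMin col0 restc := List.mem_range.1 (List.mem_of_mem_filter hi)
    have hilt : i < kc.2.length := lt_of_lt_of_le hin (hnleD kc hkc)
    simp only [Function.comp_apply, PySem.List.pyGet?_natCast,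
      List.getElem?_eq_getElem hilt, Option.getD_some]
    exact (getElem!_pos kc.2 i hilt).symm
  rw [hA]
  -- case on whether any row matched
  cases hKc : (List.range (pvMin col0 restc)).filter (fun i => (dd[p]'hpdd).2[i]! == name) with
  | nil =>
    simp only [List.map_nil, List.isEmpty_nil, if_true, List.map_map]
    rfl
  | cons k0 krest =>
    simp only [List.map_cons, List.isEmpty_cons, Bool.false_eq_true, if_false]
    rw [pv_zipStar_char]
    have hm : pvMin (col0[k0]! :: List.map (fun l => l[k0]!) restc)
        (List.map (fun i => col0[i]! :: List.map (fun l => l[i]!) restc) krest)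
        = restc.length + 1 := by
      unfold pvMin
      refine pv_foldl_min_const (restc.length + 1) _ _ (by simp) ?_
      intro l hl
      obtain ⟨i, _, rfl⟩ := List.mem_map.1 hl
      simp
    rw [hm]
    have hlendd : dd.length = restc.length + 1 := by
      have := congrArg List.length hc
      simpa using this
    refine List.ext_getElem (by simp [hlendd]) ?_
    intro j h1 h2
    have hjdd : j < dd.length := by simpa using h2
    have hjc : j < (col0 :: restc).length := by simp; omega
    rw [List.getElem_zip]
    simp only [List.getElem_map, List.getElem_range]
    have hrow : ∀ i : Nat, (col0[i]! :: List.map (fun l => l[i]!) restc)[j]! = (dd[j]'hjdd).2[i]! := by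
      intro i
      have he : (col0[i]! :: List.map (fun l => l[i]!) restc) = (col0 :: restc).map (fun l => l[i]!) := by
        simp
      rw [he, getElem!_pos _ _ (by simpa using hjc), List.getElem_map,
        pv_snd_at dd _ hc j hjdd hjc]
    refine Prod.ext (by simp) ?_
    show ((col0[k0]! :: List.map (fun l => l[k0]!) restc) ::
          List.map (fun i => col0[i]! :: List.map (fun l => l[i]!) restc) krest).map (fun r => r[j]!)
        = ((dd[j]'hjdd).1, (dd[j]'hjdd).2[k0]! :: List.map (fun i => (dd[j]'hjdd).2[i]!) krest).2
    simp only [List.map_cons, List.map_map]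
    refine congrArg₂ List.cons (hrow k0) ?_
    refine List.map_congr_left fun i _ => ?_
    simpa using hrow i

-- ===== VERDICT (by name: the statement is the Claim_ definition above) =====
theorem student_summary_prompt_spec : Claim_equal_student_summary_prompt := by
  intro data_dict student_name _ hpre
  obtain ⟨hnd, hcont, hidx⟩ := hpre
  show student_summary_prompt data_dict student_name = student_summary_prompt_alt data_dict student_name
  exact (congrArg (promptOf student_name) (pv_items_eq data_dict student_name hnd)).trans
    (congrArg (promptOf student_name) (pv_alt_items data_dict student_name hnd hcont hidx)).symm
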